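-- pv_equiv track=rewrite | github.com/clmay/school | cs2130/p03_mod_hashing.py | sentence_sum
-- ===== SOURCE A (Python) =====
-- def sentence_sum(sentence):
--     sum = 0
--     for c in sentence:
--         if c == " ":
--             sum += 31
--         else:
--             sum += ord(c) - 96
--     return sum
-- ===== SOURCE B (Python) =====
-- def sentence_sum(sentence):
--     return sum(ord(c) for c in sentence) - 96 * len(sentence) + 95 * sentence.count(" ")
-- ===== Notes on version B (the rewrite author's own statement) =====
-- stated objective: simpler
-- what changed: Replaced the branching per-character loop by a closed-form arithmetic over aggregates: raw code-point sum minus 96 per character plus a 95-per-space correction.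
import Mathlib
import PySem

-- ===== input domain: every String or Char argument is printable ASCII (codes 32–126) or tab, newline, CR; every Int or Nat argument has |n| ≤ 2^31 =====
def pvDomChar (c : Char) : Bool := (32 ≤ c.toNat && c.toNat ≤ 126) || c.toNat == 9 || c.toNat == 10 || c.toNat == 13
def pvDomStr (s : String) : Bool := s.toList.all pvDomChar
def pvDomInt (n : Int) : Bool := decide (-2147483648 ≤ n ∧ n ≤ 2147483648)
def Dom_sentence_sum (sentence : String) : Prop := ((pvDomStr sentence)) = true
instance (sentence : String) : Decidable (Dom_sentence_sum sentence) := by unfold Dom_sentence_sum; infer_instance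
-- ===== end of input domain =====

-- ===== PORT A =====
-- Port of A: branching loop over the characters.
def sentence_sum (sentence : String) : Int :=
  sentence.toList.foldl (fun sum c => if c == ' ' then sum + 31 else sum + ((c.toNat : Int) - 96)) 0

-- ===== PORT B =====
-- Port of B: raw code-point sum minus 96 per char, plus 95 per space (closed-form correction).
def sentence_sum_alt (sentence : String) : Int :=
  sentence.toList.foldl (fun s c => s + (c.toNat : Int)) 0
    - 96 * (PySem.Str.len sentence) + 95 * (sentence.toList.count ' ' : Int)

-- ===== PRECONDITION & SPEC =====
def Spec_sentence_sum (sentence : String) (out : Int) : Prop := out = sentence_sum_alt sentence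
instance (sentence : String) (out : Int) : Decidable (Spec_sentence_sum sentence out) := by unfold Spec_sentence_sum; infer_instance

-- ===== CLAIM (what is proved, stated in full; the proofs are below) =====
def Claim_equal_sentence_sum : Prop := ∀ (sentence : String), Dom_sentence_sum sentence → Spec_sentence_sum sentence (sentence_sum sentence)

-- ===== LEMMAS AND PROOFS =====

-- ===== VERDICT (by name: the statement is the Claim_ definition above) =====
lemma plain_shift (l : List Char) (a : Int) :
    l.foldl (fun s c => s + (c.toNat : Int)) a = a + l.foldl (fun s c => s + (c.toNat : Int)) 0 := by
  induction l generalizing a with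
  | nil => simp
  | cons c t ih => simp only [List.foldl_cons]; rw [ih, ih ((0:Int) + c.toNat)]; ring

lemma sum_shift (l : List Char) (a : Int) :
    l.foldl (fun sum c => if c == ' ' then sum + 31 else sum + ((c.toNat : Int) - 96)) a
      = a + l.foldl (fun s c => s + (c.toNat : Int)) 0 - 96 * l.length + 95 * (l.count ' ' : Int) := by
  induction l generalizing a with
  | nil => simp
  | cons c t ih =>
    simp only [List.foldl_cons, List.count_cons, List.length_cons]
    rw [ih, plain_shift]
    by_cases h : c = ' '
    · subst h; simp
      rw [plain_shift t 32]
      push_cast; ring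
    · simp [h]
      rw [plain_shift t (c.toNat : Int)]
      push_cast
      ring

theorem sentence_sum_spec : Claim_equal_sentence_sum := by
  intro s _
  unfold Spec_sentence_sum sentence_sum sentence_sum_alt
  rw [sum_shift, PySem.Str.len_eq]
  ring
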